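-- pv_equiv track=rewrite | github.com/KUSH42/hermes-agent | tools/output_interceptor.py | _collect_failure_excerpts
-- ===== SOURCE A (Python) =====
-- def _collect_failure_excerpts(text: str, limit: int = 3) -> list[str]:
--     excerpts: list[str] = []
--     current: list[str] = []
--     collecting = False
--     for line in text.splitlines():
--         if line.startswith("_") and "FAILURES" in line:
--             collecting = False
--             current = []
--             continue
--         if line.startswith("________________________________"):
--             if current:
--                 excerpts.append("\n".join(current[:20]).strip())
--                 if len(excerpts) >= limit:
--                     break
--             current = [line]
--             collecting = True
--             continue
--         if collecting:
--             current.append(line)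
--     if current and len(excerpts) < limit:
--         excerpts.append("\n".join(current[:20]).strip())
--     return [excerpt for excerpt in excerpts if excerpt]
-- ===== SOURCE B (Python) =====
-- def _collect_failure_excerpts(text: str, limit: int = 3) -> list[str]:
--     # Back-to-front scan: a separator line closes the group of lines buffered
--     # after it; a FAILURES reset line blocks the separator preceding it, so no
--     # 'collecting' flag, end-of-loop flush or in-loop limit break is needed.
--     groups: list[list[str]] = []
--     buf: list[str] = []
--     blocked = False
--     for line in reversed(text.splitlines()):
--         if line.startswith("_") and "FAILURES" in line:
--             buf = []
--             blocked = True
--         elif line.startswith("________________________________"):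
--             if not blocked:
--                 groups.insert(0, [line] + buf)
--             buf = []
--             blocked = False
--         else:
--             buf.insert(0, line)
--     excerpts = ["\n".join(g[:20]).strip() for g in groups]
--     return [e for e in excerpts[:max(limit, 0)] if e]
-- ===== Notes on version B (the rewrite author's own statement) =====
-- stated objective: alternative
-- what changed: A's forward state machine (collecting flag, current buffer, in-loop limit break, end-of-loop flush) is replaced by a single back-to-front scan whose state is a suppression flag and a buffer: a separator line closes the group of lines buffered after it, a FAILURES reset suppresses the separator preceding it, and the limit is applied afterwards by slicing the raw excerpt list.
-- intended difference: On limit <= 0 with two 32-underscore separator lines not interrupted by a FAILURES reset line, A still returns the first excerpt (its limit check runs only after appending, and the break skips the final-flush guard), while B returns [] - the intended meaning of a non-positive excerpt limit. — e.g. on _collect_failure_excerpts("________________________________\nboom\n________________________________", 0): A returns ["________________________________\nboom"], B returns []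
import Mathlib
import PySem

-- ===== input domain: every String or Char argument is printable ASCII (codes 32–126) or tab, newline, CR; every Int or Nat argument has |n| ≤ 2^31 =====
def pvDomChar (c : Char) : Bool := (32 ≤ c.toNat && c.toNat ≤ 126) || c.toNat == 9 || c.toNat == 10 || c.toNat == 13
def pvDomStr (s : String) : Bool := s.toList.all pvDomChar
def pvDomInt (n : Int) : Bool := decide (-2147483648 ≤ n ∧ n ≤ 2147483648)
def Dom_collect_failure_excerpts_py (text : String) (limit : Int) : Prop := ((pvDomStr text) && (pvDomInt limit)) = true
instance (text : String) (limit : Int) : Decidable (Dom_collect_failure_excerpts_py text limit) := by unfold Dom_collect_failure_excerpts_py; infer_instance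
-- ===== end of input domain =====

-- B replaces A's forward state machine (collecting flag, end-of-loop flush, in-loop limit break)
-- by a single BACK-TO-FRONT scan: a separator closes the lines buffered after it, a FAILURES line
-- suppresses the separator before it; on the corner limit ≤ 0 (see D_ below) B returns no excerpts
-- where A's post-append limit check lets one through.

-- shared small helpers (both Python versions contain these same predicates/expression)
def pvIsReset (l : String) : Bool := PySem.Str.startswith l "_" && PySem.Str.isIn "FAILURES" l
def pvIsSep32 (l : String) : Bool := PySem.Str.startswith l "________________________________"
def pvExcerpt (g : List String) : String := PySem.Str.strip (PySem.Str.join "\n" (g.take 20))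

-- ===== PORT A =====
def pvLoopA (limit : Int) : List String → List String → Bool → List String → List String
  | excerpts, current, _, [] =>
      if current ≠ [] ∧ (excerpts.length : Int) < limit then excerpts ++ [pvExcerpt current]
      else excerpts
  | excerpts, current, collecting, l :: rest =>
      if pvIsReset l then pvLoopA limit excerpts [] false rest
      else if pvIsSep32 l then
        (if current ≠ [] then
          (let excerpts' := excerpts ++ [pvExcerpt current]
           if limit ≤ (excerpts'.length : Int) then excerpts'
           else pvLoopA limit excerpts' [l] true rest)
        else pvLoopA limit excerpts [l] true rest)
      else if collecting then pvLoopA limit excerpts (current ++ [l]) collecting rest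
      else pvLoopA limit excerpts current collecting rest

def collect_failure_excerpts_py (text : String) (limit : Int) : List String :=
  (pvLoopA limit [] [] false (PySem.Str.splitlines text)).filter (fun e => e != "")

-- ===== PORT B =====
-- one step of B's reversed loop, state = (groups, buf, blocked)
def pvStepB (st : List (List String) × List String × Bool) (line : String) :
    List (List String) × List String × Bool :=
  if pvIsReset line then (st.1, [], true)
  else if pvIsSep32 line then
    ((if !st.2.2 then (line :: st.2.1) :: st.1 else st.1), [], false)
  else (st.1, line :: st.2.1, st.2.2)

def collect_failure_excerpts_py_alt (text : String) (limit : Int) : List String :=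
  let st := (PySem.Str.splitlines text).reverse.foldl pvStepB ([], [], false)
  let excerpts := st.1.map pvExcerpt
  (PySem.List.slice excerpts none (some (max limit 0))).filter (fun e => e != "")

-- ===== PRECONDITION & SPEC =====
-- a line that both starts with the 32-underscore separator and would fire A's FAILURES reset is a reset, not a separator
def pvIsSepOnly (l : String) : Bool := pvIsSep32 l && !(pvIsReset l)

-- On limit ≤ 0 with two separator lines not interrupted by a FAILURES reset line, A still returns the
-- first excerpt (its limit check runs only after appending, and the break skips the final-flush guard),
-- while B returns [] — the intended reading of a non-positive excerpt limit.
def D_collect_failure_excerpts_py (text : String) (limit : Int) : Prop :=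
  limit ≤ 0 ∧
  [true, true] <:+: ((PySem.Str.splitlines text).filter
    (fun l => pvIsSep32 l || pvIsReset l)).map pvIsSepOnly
instance (text : String) (limit : Int) : Decidable (D_collect_failure_excerpts_py text limit) := by
  unfold D_collect_failure_excerpts_py; infer_instance

def Spec_collect_failure_excerpts_py (text : String) (limit : Int) (out : List String) : Prop :=
  ¬ D_collect_failure_excerpts_py text limit → out = collect_failure_excerpts_py_alt text limit
instance (text : String) (limit : Int) (out : List String) : Decidable (Spec_collect_failure_excerpts_py text limit out) := by
  unfold Spec_collect_failure_excerpts_py; infer_instance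

def pvDiffWitness_collect_failure_excerpts_py : String × Int :=
  ("________________________________\nboom\n________________________________", 0)
def pvDiffWitnessOut_collect_failure_excerpts_py : (List String) × (List String) :=
  (["________________________________\nboom"], [])

-- ===== CLAIM (what is proved, stated in full; the proofs are below) =====
def Claim_unchanged_collect_failure_excerpts_py : Prop := ∀ (text : String) (limit : Int), Dom_collect_failure_excerpts_py text limit → Spec_collect_failure_excerpts_py text limit (collect_failure_excerpts_py text limit)
def Claim_exact_collect_failure_excerpts_py : Prop := ∀ (text : String) (limit : Int), Dom_collect_failure_excerpts_py text limit → D_collect_failure_excerpts_py text limit → collect_failure_excerpts_py text limit ≠ collect_failure_excerpts_py_alt text limit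
def Claim_changed_collect_failure_excerpts_py : Prop := Dom_collect_failure_excerpts_py (pvDiffWitness_collect_failure_excerpts_py.1) (pvDiffWitness_collect_failure_excerpts_py.2) ∧ D_collect_failure_excerpts_py (pvDiffWitness_collect_failure_excerpts_py.1) (pvDiffWitness_collect_failure_excerpts_py.2) ∧ collect_failure_excerpts_py (pvDiffWitness_collect_failure_excerpts_py.1) (pvDiffWitness_collect_failure_excerpts_py.2) = pvDiffWitnessOut_collect_failure_excerpts_py.1 ∧ collect_failure_excerpts_py_alt (pvDiffWitness_collect_failure_excerpts_py.1) (pvDiffWitness_collect_failure_excerpts_py.2) = pvDiffWitnessOut_collect_failure_excerpts_py.2 ∧ pvDiffWitnessOut_collect_failure_excerpts_py.1 ≠ pvDiffWitnessOut_collect_failure_excerpts_py.2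

-- ===== LEMMAS AND PROOFS =====

-- forward grouping spec used only in the proofs: the list of separator-delimited groups
def pvPhase1 : List (List String) → Option (List String) → List String → List (List String)
  | groups, cur, [] =>
      match cur with | none => groups | some c => groups ++ [c]
  | groups, cur, l :: rest =>
      if pvIsReset l then pvPhase1 groups none rest
      else if pvIsSep32 l then
        pvPhase1 (match cur with | none => groups | some c => groups ++ [c]) (some [l]) rest
      else
        match cur with
        | none => pvPhase1 groups none rest
        | some c => pvPhase1 groups (some (c ++ [l])) rest

theorem pvPhase1_acc (lines : List String) (cur : Option (List String)) (gs : List (List String)) :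
    pvPhase1 gs cur lines = gs ++ pvPhase1 [] cur lines := by
  induction lines generalizing cur gs with
  | nil => cases cur <;> simp [pvPhase1]
  | cons l rest ih =>
    cases cur with
    | none =>
      by_cases h1 : pvIsReset l = true <;> by_cases h2 : pvIsSep32 l = true <;>
        simp only [pvPhase1, h1, h2, if_true, if_false, Bool.false_eq_true] <;> exact ih _ _
    | some c =>
      by_cases h1 : pvIsReset l = true <;> by_cases h2 : pvIsSep32 l = true <;>
        simp only [pvPhase1, h1, h2, if_true, if_false, Bool.false_eq_true]
      · exact ih _ _
      · exact ih _ _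
      · rw [ih (some [l]) (gs ++ [c]), ih (some [l]) ([] ++ [c])]
        simp
      · exact ih _ _

-- the leading run of plain lines, and whether the first sep/reset event is a reset
def pvPrefOf : List String → List String
  | [] => []
  | l :: r => if pvIsReset l then [] else if pvIsSep32 l then [] else l :: pvPrefOf r

def pvBlockedOf : List String → Bool
  | [] => false
  | l :: r => if pvIsReset l then true else if pvIsSep32 l then false else pvBlockedOf r

theorem pvPhase1_some (lines : List String) (c : List String) :
    pvPhase1 [] (some c) lines =
      if pvBlockedOf lines then pvPhase1 [] none lines
      else (c ++ pvPrefOf lines) :: pvPhase1 [] none lines := by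
  induction lines generalizing c with
  | nil => simp [pvPhase1, pvBlockedOf, pvPrefOf]
  | cons l rest ih =>
    by_cases h1 : pvIsReset l = true
    · simp [pvPhase1, pvBlockedOf, h1]
    · by_cases h2 : pvIsSep32 l = true
      · simp only [pvPhase1, h1, h2, if_false, Bool.false_eq_true, pvBlockedOf, pvPrefOf]
        rw [pvPhase1_acc rest (some [l]) ([] ++ [c])]
        simp
      · simp only [pvPhase1, h1, h2, if_false, Bool.false_eq_true, pvBlockedOf, pvPrefOf]
        rw [ih (c ++ [l])]
        simp

-- B's reversed fold computes the forward groups together with (pref, blocked)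
theorem pvBack_spec (lines : List String) :
    lines.reverse.foldl pvStepB ([], [], false) =
      (pvPhase1 [] none lines, pvPrefOf lines, pvBlockedOf lines) := by
  induction lines with
  | nil => simp [pvPhase1, pvPrefOf, pvBlockedOf]
  | cons l rest ih =>
    rw [List.reverse_cons, List.foldl_append, ih]
    simp only [List.foldl_cons, List.foldl_nil]
    by_cases h1 : pvIsReset l = true
    · simp [pvStepB, pvPhase1, pvPrefOf, pvBlockedOf, h1]
    · by_cases h2 : pvIsSep32 l = true
      · simp only [pvStepB, h1, h2, if_true, if_false, Bool.false_eq_true]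
        have : pvPhase1 [] none (l :: rest) = pvPhase1 [] (some [l]) rest := by
          simp [pvPhase1, h1, h2]
        rw [this, pvPhase1_some]
        by_cases hb : pvBlockedOf rest = true <;>
          simp [hb, pvPrefOf, pvBlockedOf, h1, h2]
      · simp [pvStepB, pvPhase1, pvPrefOf, pvBlockedOf, h1, h2]

theorem pvAlt_eq (text : String) (limit : Int) :
    collect_failure_excerpts_py_alt text limit =
      (PySem.List.slice ((pvPhase1 [] none (PySem.Str.splitlines text)).map pvExcerpt)
        none (some (max limit 0))).filter (fun e => e != "") := by
  unfold collect_failure_excerpts_py_alt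
  rw [pvBack_spec]

-- the main invariant, positive remaining budget
theorem pvMain_pos (limit : Int) (lines : List String) (cur : Option (List String)) (E : List String)
    (hc : ∀ c, cur = some c → c ≠ []) (hE : (E.length : Int) < limit) :
    pvLoopA limit E (cur.elim [] id) cur.isSome lines
      = E ++ ((pvPhase1 [] cur lines).map pvExcerpt).take (limit.toNat - E.length) := by
  induction lines generalizing cur E with
  | nil =>
    cases cur with
    | none => simp [pvLoopA, pvPhase1]
    | some c =>
      have hc' : c ≠ [] := hc c rfl
      have h1 : 1 ≤ limit.toNat - E.length := by omega
      simp [pvLoopA, pvPhase1, hc', hE]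
      omega
  | cons l rest ih =>
    cases cur with
    | none =>
      by_cases h1 : pvIsReset l = true
      · simpa [pvLoopA, pvPhase1, h1] using ih none E (by simp) hE
      · by_cases h2 : pvIsSep32 l = true
        · simpa [pvLoopA, pvPhase1, h1, h2] using ih (some [l]) E (by simp) hE
        · simpa [pvLoopA, pvPhase1, h1, h2] using ih none E (by simp) hE
    | some c =>
      have hc' : c ≠ [] := hc c rfl
      by_cases h1 : pvIsReset l = true
      · simpa [pvLoopA, pvPhase1, h1] using ih none E (by simp) hE
      · by_cases h2 : pvIsSep32 l = true
        · have hsplit : pvPhase1 [] (some c) (l :: rest) = c :: pvPhase1 [] (some [l]) rest := by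
            simp only [pvPhase1, h1, h2, if_true, if_false, Bool.false_eq_true]
            rw [pvPhase1_acc]; simp
          rw [hsplit]
          simp only [Option.elim_some, Option.isSome_some, id_eq]
          by_cases h3 : limit ≤ (E.length : Int) + 1
          · have ht : limit.toNat - E.length = 1 := by omega
            simp [pvLoopA, h1, h2, hc', h3, ht]
          · have hlen : ¬ limit ≤ ((E ++ [pvExcerpt c]).length : Int) := by
              simp only [List.length_append, List.length_cons, List.length_nil]
              push_cast; omega
            have hrec := ih (some [l]) (E ++ [pvExcerpt c]) (by simp)
              (by simp only [List.length_append, List.length_cons, List.length_nil]; push_cast; omega)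
            simp only [Option.elim_some, Option.isSome_some, id_eq] at hrec
            have ht : limit.toNat - E.length = (limit.toNat - (E ++ [pvExcerpt c]).length) + 1 := by
              simp only [List.length_append, List.length_cons, List.length_nil]; omega
            simp only [pvLoopA, h1, h2, if_true, if_false, Bool.false_eq_true, ne_eq, hc',
              not_false_eq_true, hlen]
            rw [hrec, ht]
            simp [List.take_succ_cons]
        · simpa [pvLoopA, pvPhase1, h1, h2, hc'] using ih (some (c ++ [l])) E (by simp) hE

-- when the budget is already exhausted and no separator pair is reachable, A's loop returns []
def pvHasPair (opn : Bool) : List String → Bool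
  | [] => false
  | l :: rest =>
      if pvIsReset l then pvHasPair false rest
      else if pvIsSep32 l then (opn || pvHasPair true rest)
      else pvHasPair opn rest

theorem pvMain_nonpos (limit : Int) (lines : List String) (cur : Option (List String))
    (hlim : limit ≤ 0) (hnp : pvHasPair cur.isSome lines = false) :
    pvLoopA limit [] (cur.elim [] id) cur.isSome lines = [] := by
  induction lines generalizing cur with
  | nil => cases cur <;> simp [pvLoopA, show ¬((0:Int) < limit) from by omega]
  | cons l rest ih =>
    cases cur with
    | none =>
      by_cases h1 : pvIsReset l = true
      · simpa [pvLoopA, h1] using ih none (by simpa [pvHasPair, h1] using hnp)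
      · by_cases h2 : pvIsSep32 l = true
        · simpa [pvLoopA, h1, h2] using ih (some [l]) (by simpa [pvHasPair, h1, h2] using hnp)
        · simpa [pvLoopA, h1, h2] using ih none (by simpa [pvHasPair, h1, h2] using hnp)
    | some c =>
      by_cases h1 : pvIsReset l = true
      · simpa [pvLoopA, h1] using ih none (by simpa [pvHasPair, h1] using hnp)
      · by_cases h2 : pvIsSep32 l = true
        · exfalso; simp [pvHasPair, h1, h2] at hnp
        · simpa [pvLoopA, h1, h2] using ih (some (c ++ [l])) (by simpa [pvHasPair, h1, h2] using hnp)

-- pvHasPair over lines equals adjacent-true search over the event mask of D_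
def pvAdj : Bool → List Bool → Bool
  | _, [] => false
  | b, t :: r => if t then (b || pvAdj true r) else pvAdj false r

theorem pvHasPair_eq_pvAdj (lines : List String) (b : Bool) :
    pvHasPair b lines =
      pvAdj b ((lines.filter (fun l => pvIsSep32 l || pvIsReset l)).map pvIsSepOnly) := by
  induction lines generalizing b with
  | nil => simp [pvHasPair, pvAdj]
  | cons l rest ih =>
    by_cases h1 : pvIsReset l = true
    · have hso : pvIsSepOnly l = false := by simp [pvIsSepOnly, h1]
      simp [pvHasPair, h1, hso, pvAdj, ih]
    · by_cases h2 : pvIsSep32 l = true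
      · have hso : pvIsSepOnly l = true := by simp [pvIsSepOnly, h1, h2]
        simp [pvHasPair, h1, h2, hso, pvAdj, ih]
      · simp [pvHasPair, h1, h2, ih]

theorem pvPrefix_tt {r : List Bool} : ([true] <+: r) ↔ r.head? = some true := by
  cases r with
  | nil => simp
  | cons a t => simp [List.cons_prefix_cons, eq_comm]

theorem pvAdj_iff (bs : List Bool) :
    (pvAdj false bs = true ↔ [true, true] <:+: bs) ∧
    (pvAdj true bs = true ↔ (bs.head? = some true ∨ [true, true] <:+: bs)) := by
  induction bs with
  | nil => simp [pvAdj]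
  | cons t r ih =>
    obtain ⟨ihF, ihT⟩ := ih
    cases t with
    | false =>
      have hnp : ¬ ([true, true] <+: (false :: r)) := by
        simp [List.cons_prefix_cons]
      constructor
      · rw [List.infix_cons_iff]
        simp [pvAdj, ihF, hnp]
      · rw [List.infix_cons_iff]
        simp [pvAdj, ihF, hnp]
    | true =>
      constructor
      · rw [List.infix_cons_iff]
        have : ([true, true] <+: (true :: r)) ↔ r.head? = some true := by
          simp [List.cons_prefix_cons, pvPrefix_tt]
        simp [pvAdj, ihT, this, or_comm]
      · simp [pvAdj]

-- a non-space element survives dropWhile isspace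
theorem pvMem_dropWhile {p : Char → Bool} {l : List Char} {x : Char}
    (hx : x ∈ l) (hpx : p x = false) : x ∈ l.dropWhile p := by
  induction l with
  | nil => cases hx
  | cons a t ih =>
    by_cases ha : p a = true
    · rcases List.mem_cons.1 hx with rfl | hxt
      · exact absurd ha (by simp [hpx])
      · simpa [List.dropWhile, ha] using ih hxt
    · simpa [List.dropWhile, ha] using hx

theorem pvStrip_ne_nil {cs : List Char} {x : Char} (hx : x ∈ cs)
    (hxs : PySem.Chars.isspace x = false) : PySem.Chars.strip cs ≠ [] := by
  intro h
  have h1 : x ∈ PySem.Chars.lstrip cs := pvMem_dropWhile hx hxs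
  have h2 : ∀ y ∈ (PySem.Chars.lstrip cs).reverse, PySem.Chars.isspace y = true := by
    have := h
    simp only [PySem.Chars.strip, PySem.Chars.rstrip, List.reverse_eq_nil_iff] at this
    exact List.dropWhile_eq_nil_iff.1 this
  have := h2 x (List.mem_reverse.2 h1)
  rw [hxs] at this
  exact Bool.false_ne_true this

theorem pvExcerpt_ne {c : List String} (hc : c ≠ [])
    (hs : pvIsSep32 (c.headD "") = true) : pvExcerpt c ≠ "" := by
  obtain ⟨h, t, rfl⟩ := List.exists_cons_of_ne_nil hc
  have hpre : ("________________________________" : String).toList <+: h.toList := by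
    simpa only [pvIsSep32, PySem.Str.startswith_eq, PySem.Chars.startswith_iff,
      List.headD_cons] using hs
  have hmem : '_' ∈ h.toList := by
    obtain ⟨r, hr⟩ := hpre
    rw [← hr]; simp
  have hjoin : '_' ∈ (PySem.Str.join "\n" ((h :: t).take 20)).toList := by
    rw [PySem.Str.toList_join]
    simp only [List.take_succ_cons, List.map_cons]
    cases htl : (t.take 19).map String.toList with
    | nil => simpa [PySem.Chars.join_singleton] using hmem
    | cons q qs => rw [PySem.Chars.join_cons_cons]; simp [hmem]
  intro hcontra
  have : PySem.Chars.strip (PySem.Str.join "\n" ((h :: t).take 20)).toList = [] := by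
    rw [← PySem.Str.toList_strip]
    simpa [pvExcerpt] using congrArg String.toList hcontra
  exact pvStrip_ne_nil hjoin (by decide) this

theorem pvHeadD_append {c : List String} (l d : String) (hc : c ≠ []) :
    (c ++ [l]).headD d = c.headD d := by
  cases c with
  | nil => exact absurd rfl hc
  | cons a t => simp

-- with an exhausted budget, a reachable separator pair forces one flush, which A returns at once
theorem pvLoop_flush (limit : Int) (lines : List String) (cur : Option (List String)) (E : List String)
    (hlim : limit ≤ 0) (hp : pvHasPair cur.isSome lines = true)
    (hc : ∀ c, cur = some c → c ≠ [] ∧ pvIsSep32 (c.headD "") = true) :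
    ∃ c, pvLoopA limit E (cur.elim [] id) cur.isSome lines = E ++ [pvExcerpt c] ∧
      c ≠ [] ∧ pvIsSep32 (c.headD "") = true := by
  induction lines generalizing cur with
  | nil => simp [pvHasPair] at hp
  | cons l rest ih =>
    cases cur with
    | none =>
      by_cases h1 : pvIsReset l = true
      · simpa [pvLoopA, h1] using ih none (by simpa [pvHasPair, h1] using hp) (by simp)
      · by_cases h2 : pvIsSep32 l = true
        · have hrec := ih (some [l]) (by simpa [pvHasPair, h1, h2] using hp) (by simp [h2])
          simpa [pvLoopA, h1, h2] using hrec
        · simpa [pvLoopA, h1, h2] using ih none (by simpa [pvHasPair, h1, h2] using hp) (by simp)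
    | some c =>
      obtain ⟨hcne, hchead⟩ := hc c rfl
      by_cases h1 : pvIsReset l = true
      · simpa [pvLoopA, h1] using ih none (by simpa [pvHasPair, h1] using hp) (by simp)
      · by_cases h2 : pvIsSep32 l = true
        · refine ⟨c, ?_, hcne, hchead⟩
          simp [pvLoopA, h1, h2, hcne]
          omega
        · have hinv : ∀ c', some (c ++ [l]) = some c' → c' ≠ [] ∧ pvIsSep32 (c'.headD "") = true := by
            intro c' hc'; cases hc'
            exact ⟨by simp, by rwa [pvHeadD_append _ _ hcne]⟩
          simpa [pvLoopA, h1, h2] using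
            ih (some (c ++ [l])) (by simpa [pvHasPair, h1, h2] using hp) hinv

-- ===== VERDICT (by name: the statement is the Claim_ definition above) =====
theorem collect_failure_excerpts_py_spec : Claim_unchanged_collect_failure_excerpts_py := by
  intro text limit _ hnD
  unfold collect_failure_excerpts_py
  rw [pvAlt_eq]
  by_cases hpos : 1 ≤ limit
  · have hA := pvMain_pos limit (PySem.Str.splitlines text) none [] (by simp) (by simpa using hpos)
    simp only [Option.elim_none, Option.isSome_none, List.length_nil, Nat.sub_zero,
      List.nil_append] at hA
    have hmax : max limit 0 = limit := by omega
    rw [hA]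
    simp only [hmax, PySem.List.slice_to _ (show (0:Int) ≤ limit from by omega)]
  · have hlim : limit ≤ 0 := by omega
    have hnp : pvHasPair false (PySem.Str.splitlines text) = false := by
      by_contra hb
      have hb' : pvHasPair false (PySem.Str.splitlines text) = true := by
        cases h : pvHasPair false (PySem.Str.splitlines text) <;> simp_all
      rw [pvHasPair_eq_pvAdj] at hb'
      exact hnD ⟨hlim, (pvAdj_iff _).1.mp hb'⟩
    have hA := pvMain_nonpos limit (PySem.Str.splitlines text) none hlim (by simpa using hnp)
    simp only [Option.elim_none, Option.isSome_none] at hA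
    have hmax : max limit 0 = 0 := by omega
    rw [hA]
    simp only [hmax, PySem.List.slice_to _ (le_refl (0:Int))]
    simp

theorem collect_failure_excerpts_py_changed : Claim_changed_collect_failure_excerpts_py := by
  unfold Claim_changed_collect_failure_excerpts_py; decide

theorem collect_failure_excerpts_py_tight : Claim_exact_collect_failure_excerpts_py := by
  intro text limit _ hD
  obtain ⟨hlim, hpair⟩ := hD
  have hp : pvHasPair false (PySem.Str.splitlines text) = true := by
    rw [pvHasPair_eq_pvAdj]
    exact (pvAdj_iff _).1.mpr hpair
  obtain ⟨c, hres, hcne, hchead⟩ :=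
    pvLoop_flush limit (PySem.Str.splitlines text) none [] hlim (by simpa using hp) (by simp)
  simp only [Option.elim_none, Option.isSome_none, List.nil_append] at hres
  have hex : pvExcerpt c ≠ "" := pvExcerpt_ne hcne hchead
  unfold collect_failure_excerpts_py
  rw [pvAlt_eq, hres]
  have hmax : max limit 0 = 0 := by omega
  simp only [hmax, PySem.List.slice_to _ (le_refl (0:Int))]
  simp [hex]
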